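-- pv_equiv track=rewrite | github.com/posl/comment_recommendation | script/mod_gen/2_time/en/238_C/4.py | f
-- ===== SOURCE A (Python) =====
-- def   f ( n ):
--      if   n   <=   9 :
--          return   n
--      else :
--          length   =   len ( str ( n ))
--          ans   =   0
--          for   i   in   range ( 1 ,   length ):
--              ans   +=   9   *   10 ** ( i - 1 )   *   i
--          ans   +=   ( n   -   10 ** ( length - 1 )   +   1 )   *   length
--          return   ans
-- ===== SOURCE B (Python) =====
-- def f(n):
--     if n <= 9:
--         return n
--     # every number 1..n contributes 1 digit, plus one extra digit for each
--     # power of ten 10^k <= n it reaches: total = n + sum(n - 10^k + 1)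
--     total = n
--     p = 10
--     while p <= n:
--         total += n - p + 1
--         p *= 10
--     return total
-- ===== Notes on version B (the rewrite author's own statement) =====
-- stated objective: alternative
-- what changed: B drops the str(n)/digit-length computation and the geometric per-digit-group series; it counts, for each power of ten p <= n, the n-p+1 numbers in 1..n that reach that many digits, accumulating in one while loop over p = 10, 100, ...
import Mathlib
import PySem

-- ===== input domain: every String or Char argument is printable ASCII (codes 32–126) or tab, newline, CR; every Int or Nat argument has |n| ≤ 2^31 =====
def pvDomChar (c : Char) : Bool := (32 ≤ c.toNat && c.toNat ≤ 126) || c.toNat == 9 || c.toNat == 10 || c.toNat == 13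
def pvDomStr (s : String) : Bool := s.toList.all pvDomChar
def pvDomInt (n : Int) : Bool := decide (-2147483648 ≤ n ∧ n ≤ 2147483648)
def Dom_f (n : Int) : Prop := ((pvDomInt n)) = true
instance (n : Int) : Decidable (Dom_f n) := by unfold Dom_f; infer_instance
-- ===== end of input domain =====

-- B replaces A's digit-length/geometric-series formula by counting, for each power of
-- ten 10^k ≤ n, the numbers in 1..n that reach it (alternative decomposition, same cost).

-- ===== PORT A =====
-- 10**(i-1): Python '**'; exact here since every exponent appearing is ≥ 0.
def f (n : Int) : Int :=
  if n ≤ 9 then n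
  else
    let length : Int := PySem.Str.len (PySem.Int.toStr n)
    let ans : Int :=
      (PySem.List.pyRange 1 length 1).foldl (fun ans i => ans + 9 * 10 ^ (i - 1).toNat * i) 0
    ans + (n - 10 ^ (length - 1).toNat + 1) * length

-- ===== PORT B =====
-- the while loop of Source B; hp records that p stays positive (p starts at 10, is multiplied by 10)
def fLoop (n total p : Int) (hp : 0 < p) : Int :=
  if p ≤ n then fLoop n (total + (n - p + 1)) (10 * p) (by omega) else total
  termination_by (n + 1 - p).toNat
  decreasing_by omega

def f_alt (n : Int) : Int :=
  if n ≤ 9 then n else fLoop n n 10 (by norm_num)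

-- ===== PRECONDITION & SPEC =====
def Spec_f (n : Int) (out : Int) : Prop := out = f_alt n
instance (n : Int) (out : Int) : Decidable (Spec_f n out) := by unfold Spec_f; infer_instance

-- ===== CLAIM (what is proved, stated in full; the proofs are below) =====
def Claim_equal_f : Prop := ∀ (n : Int), Dom_f n → Spec_f n (f n)

-- ===== LEMMAS AND PROOFS =====

-- Σ_{i=1}^{K} 9·10^(i-1)·i  (A's grouped sum, digit lengths below the top one)
def sumA : Nat → Int
  | 0 => 0
  | K + 1 => sumA K + 9 * 10 ^ K * (K + 1)

-- Σ_{k=1}^{K} (n - 10^k + 1)  (B's per-threshold sum)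
def sumB (n : Int) : Nat → Int
  | 0 => 0
  | K + 1 => sumB n K + (n - 10 ^ (K + 1) + 1)

-- Σ_{t<d} (n - 10^(j+t) + 1): B's loop contributions starting at p = 10^j
def seg (n : Int) (j : Nat) : Nat → Int
  | 0 => 0
  | d + 1 => (n - 10 ^ j + 1) + seg n (j + 1) d

-- exact length of the decimal representation
theorem toDigitsCore_len_exact (f n : Nat) (hf : n < f) :
    (Nat.toDigitsCore 10 f n []).length = Nat.log 10 n + 1 := by
  induction f generalizing n with
  | zero => omega
  | succ f ih =>
    simp only [Nat.toDigitsCore]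
    by_cases h : n / 10 = 0
    · have hn : n < 10 := by omega
      have hl : Nat.log 10 n = 0 := Nat.log_eq_zero_iff.mpr (Or.inl hn)
      simp [h, hl]
    · have hn : 10 ≤ n := by omega
      rw [if_neg h, Nat.toDigitsCore_lens_eq, ih (n / 10) (by omega)]
      have hlog : Nat.log 10 (n / 10) = Nat.log 10 n - 1 := Nat.log_div_base 10 n
      have hpos : 0 < Nat.log 10 n := Nat.log_pos (by norm_num) hn
      omega

theorem toDigits_len_exact (n : Nat) :
    (Nat.toDigits 10 n).length = Nat.log 10 n + 1 :=
  toDigitsCore_len_exact (n + 1) n (Nat.lt_succ_self n)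

theorem len_toStr_pos (n : Int) (hn : 0 ≤ n) :
    PySem.Str.len (PySem.Int.toStr n) = (Nat.log 10 n.toNat : Int) + 1 := by
  rw [PySem.Str.len_eq, PySem.Int.toList_toStr]
  unfold PySem.Int.toChars
  rw [if_neg (by omega), toDigits_len_exact]
  push_cast
  ring

-- A's range-loop computes sumA
theorem foldA_eq (K : Nat) (acc : Int) :
    ((List.range K).map (fun k : Nat => (1 : Int) + (k : Int))).foldl
      (fun ans i => ans + 9 * 10 ^ (i - 1).toNat * i) acc = acc + sumA K := by
  induction K generalizing acc with
  | zero => simp [sumA]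
  | succ K ih =>
    rw [List.range_succ, List.map_append, List.foldl_append, ih]
    have h1 : ((1 : Int) + K - 1).toNat = K := by omega
    simp only [List.map_cons, List.map_nil, List.foldl_cons, List.foldl_nil, sumA, h1]
    ring

-- proof-irrelevant congruence in the loop's third argument
theorem fLoop_congr (n total p q : Int) (hp : 0 < p) (hq : 0 < q) (h : p = q) :
    fLoop n total p hp = fLoop n total q hq := by subst h; rfl

theorem fLoop_step (n total p : Int) (hp : 0 < p) (h : p ≤ n) :
    fLoop n total p hp = fLoop n (total + (n - p + 1)) (10 * p) (by omega) := by
  rw [fLoop, if_pos h]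

theorem fLoop_stop (n total p : Int) (hp : 0 < p) (h : ¬ p ≤ n) :
    fLoop n total p hp = total := by
  rw [fLoop, if_neg h]

-- B's loop, started at p = 10^j, adds exactly seg n j d when the loop runs d more times
theorem fLoop_eq_seg (d : Nat) (j : Nat) (hj : 0 < j) (n total : Int)
    (hlo : d = 0 ∨ (10 : Int) ^ (j + d - 1) ≤ n) (hhi : n < (10 : Int) ^ (j + d)) :
    fLoop n total ((10 : Int) ^ j) (by positivity) = total + seg n j d := by
  induction d generalizing j total with
  | zero =>
    rw [fLoop_stop _ _ _ _ (by simpa using hhi)]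
    simp [seg]
  | succ d ih =>
    have hstep : (10 : Int) ^ j ≤ n := by
      rcases hlo with h | h
      · omega
      · calc (10 : Int) ^ j ≤ 10 ^ (j + (d + 1) - 1) := by
              apply pow_le_pow_right₀ <;> omega
          _ ≤ n := h
    rw [fLoop_step _ _ _ _ hstep,
        fLoop_congr n _ (10 * 10 ^ j) (10 ^ (j + 1)) (by positivity) (by positivity)
          (by rw [pow_succ]; ring),
        ih (j + 1) (by omega) _
          (by rcases d with _ | d
              · exact Or.inl rfl
              · right
                have : j + 1 + (d + 1) - 1 = j + (d + 1 + 1) - 1 := by omega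
                rw [this]
                rcases hlo with h | h
                · omega
                · exact h)
          (by have : j + 1 + d = j + (d + 1) := by omega
              rw [this]; exact hhi)]
    simp [seg]
    ring

-- rebracketing seg: consuming from the bottom equals appending at the top
theorem seg_succ_right (n : Int) (j d : Nat) :
    seg n j (d + 1) = seg n j d + (n - 10 ^ (j + d) + 1) := by
  induction d generalizing j with
  | zero => simp [seg]
  | succ d ih =>
    show (n - 10 ^ j + 1) + seg n (j + 1) (d + 1) = _
    rw [ih (j + 1)]
    simp only [seg]
    have : j + 1 + d = j + (d + 1) := by omega
    rw [this]
    ring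

theorem seg_one_eq_sumB (n : Int) (K : Nat) : seg n 1 K = sumB n K := by
  induction K with
  | zero => rfl
  | succ K ih =>
    rw [seg_succ_right, ih]
    simp only [sumB]
    have : 1 + K = K + 1 := by omega
    rw [this]

-- the arithmetic heart: A's grouped formula equals B's per-threshold count
theorem sumA_sumB (n : Int) (K : Nat) :
    sumA K + (n - 10 ^ K + 1) * ((K : Int) + 1) = n + sumB n K := by
  induction K with
  | zero => simp [sumA, sumB]
  | succ K ih =>
    simp only [sumA, sumB]
    have h : (n - 10 ^ (K + 1) + 1) * ((K : Int) + 1 + 1)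
        = (n - 10 ^ (K + 1) + 1) * ((K : Int) + 1) + (n - 10 ^ (K + 1) + 1) := by ring
    rw [pow_succ]
    push_cast
    push_cast at ih
    linear_combination ih

theorem f_spec : Claim_equal_f := by
  unfold Claim_equal_f Spec_f
  intro n _
  by_cases h9 : n ≤ 9
  · simp [f, f_alt, h9]
  · have hn10 : 10 ≤ n := by omega
    have hnn : (n.toNat : Int) = n := Int.toNat_of_nonneg (by omega)
    obtain ⟨K, hKdef⟩ : ∃ K, Nat.log 10 n.toNat = K := ⟨_, rfl⟩
    have hKpos : 0 < K := hKdef ▸ Nat.log_pos (by norm_num) (by omega)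
    have hlow : (10 : Int) ^ K ≤ n := by
      have h := Nat.pow_log_le_self 10 (x := n.toNat) (by omega)
      rw [hKdef] at h
      have h2 : (((10 : Nat) ^ K : Nat) : Int) ≤ (n.toNat : Int) := by exact_mod_cast h
      push_cast at h2
      omega
    have hhigh : n < (10 : Int) ^ (K + 1) := by
      have h := Nat.lt_pow_succ_log_self (b := 10) (by norm_num) n.toNat
      rw [hKdef] at h
      have h2 : (n.toNat : Int) < (((10 : Nat) ^ (K + 1) : Nat) : Int) := by exact_mod_cast h
      push_cast at h2
      omega
    have hlen : PySem.Str.len (PySem.Int.toStr n) = (K : Int) + 1 := by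
      rw [len_toStr_pos n (by omega), hKdef]
    unfold f f_alt
    rw [if_neg h9, if_neg h9]
    simp only [hlen]
    rw [PySem.List.pyRange_one]
    have h1 : ((K : Int) + 1 - 1).toNat = K := by omega
    rw [h1, foldA_eq]
    have hB : fLoop n n 10 (by norm_num) = n + seg n 1 K := by
      rw [fLoop_congr n n 10 ((10 : Int) ^ 1) (by norm_num) (by positivity) (by norm_num)]
      exact fLoop_eq_seg K 1 (by norm_num) n n
        (by right
            calc (10 : Int) ^ (1 + K - 1) = 10 ^ K := by congr 1; omega
              _ ≤ n := hlow)
        (by have h12 : 1 + K = K + 1 := by omega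
            rw [h12]; exact hhigh)
    rw [hB, seg_one_eq_sumB]
    have := sumA_sumB n K
    omega
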